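-- pv_equiv track=rewrite | github.com/garam0107/IM | 파리퇴치3.py | remove2
-- ===== SOURCE A (Python) =====
-- def remove2(N,M,arr,i,j):
--     dr = [-1,1,1,-1]
--     dc = [1,1,-1,-1]
--     sum = arr[i][j]
--     for k in range(4):
--         for add in range(1,M):
--             nr = i + dr[k] * add
--             nc = j + dc[k] * add
--             if 0 <= nr < N and 0 <= nc < N:
--                 sum += arr[nr][nc]
--     return sum
-- ===== SOURCE B (Python) =====
-- def remove2(N, M, arr, i, j):
--     # Brute-force board scan: visit every cell of the N x N board and test it
--     # for membership on one of the two diagonals through (i, j) within distance M-1.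
--     total = arr[i][j]
--     for r in range(N):
--         d = r - i
--         for c in range(N):
--             if d != 0 and -M < d < M and (c == j + d or c == j - d):
--                 total += arr[r][c]
--     return total
-- ===== Notes on version B (the rewrite author's own statement) =====
-- stated objective: alternative
-- what changed: B abandons A's ray-walking (4 direction vectors x range(1,M) of offset steps) for a whole-board scan: it enumerates every cell (r,c) of the N x N board once and adds it if it passes a diagonal-membership predicate (r != i, |r-i| < M, c = j+(r-i) or c = j-(r-i)); this trades A's O(M) offset enumeration for an O(N^2) cell enumeration with a per-cell test.
import Mathlib
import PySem

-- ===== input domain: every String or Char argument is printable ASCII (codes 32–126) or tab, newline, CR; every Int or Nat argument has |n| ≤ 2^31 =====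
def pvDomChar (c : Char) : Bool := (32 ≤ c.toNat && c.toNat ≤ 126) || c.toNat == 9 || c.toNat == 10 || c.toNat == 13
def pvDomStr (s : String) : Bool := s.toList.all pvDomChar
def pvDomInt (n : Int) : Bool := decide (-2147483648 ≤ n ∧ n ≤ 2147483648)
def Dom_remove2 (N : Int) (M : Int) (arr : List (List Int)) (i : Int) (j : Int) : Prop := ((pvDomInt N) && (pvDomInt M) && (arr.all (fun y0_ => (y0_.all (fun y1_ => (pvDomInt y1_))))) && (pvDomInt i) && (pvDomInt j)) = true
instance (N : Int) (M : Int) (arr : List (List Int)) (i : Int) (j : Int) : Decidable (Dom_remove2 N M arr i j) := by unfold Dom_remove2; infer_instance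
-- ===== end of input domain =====

-- B replaces A's ray-walking (4 direction vectors x offset steps) by a whole-board scan with a
-- per-cell diagonal-membership test (objective: alternative algorithm; O(N^2) instead of O(M)).

-- arr[r][c] with Python indexing; the default 0 is only reached outside Pre_remove2 (where Python raises)
def pvCell (arr : List (List Int)) (r c : Int) : Int :=
  match PySem.List.pyGet? arr r with
  | some row => (PySem.List.pyGet? row c).getD 0
  | none => 0

-- ===== PORT A =====
def remove2 (N : Int) (M : Int) (arr : List (List Int)) (i : Int) (j : Int) : Int :=
  let dr : List Int := [-1, 1, 1, -1]
  let dc : List Int := [1, 1, -1, -1]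
  (PySem.List.pyRange 0 4 1).foldl (fun sum k =>
    (PySem.List.pyRange 1 M 1).foldl (fun sum add =>
      let nr := i + PySem.List.pyGetD dr k 0 * add
      let nc := j + PySem.List.pyGetD dc k 0 * add
      if 0 ≤ nr ∧ nr < N ∧ 0 ≤ nc ∧ nc < N then sum + pvCell arr nr nc else sum) sum)
    (pvCell arr i j)

-- ===== PORT B =====
def remove2_alt (N : Int) (M : Int) (arr : List (List Int)) (i : Int) (j : Int) : Int :=
  (PySem.List.pyRange 0 N 1).foldl (fun total r =>
    let d := r - i
    (PySem.List.pyRange 0 N 1).foldl (fun total c =>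
      if d ≠ 0 ∧ -M < d ∧ d < M ∧ (c = j + d ∨ c = j - d)
      then total + pvCell arr r c else total) total)
    (pvCell arr i j)

-- ===== PRECONDITION & SPEC =====
-- the cell at (r, c) exists in arr under Python indexing (no IndexError)
def pvCellOK (arr : List (List Int)) (r c : Int) : Prop :=
  ((PySem.List.pyGet? arr r).bind (fun row => PySem.List.pyGet? row c)).isSome = true

def pvInB (N r c : Int) : Prop := 0 ≤ r ∧ r < N ∧ 0 ≤ c ∧ c < N

-- exactly where A returns: the center access succeeds (Python negative indices wrap) and every
-- diagonal cell that passes the 0 ≤ · < N board checks actually exists in arr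
def Pre_remove2 (N : Int) (M : Int) (arr : List (List Int)) (i : Int) (j : Int) : Prop :=
  pvCellOK arr i j ∧
  ∀ d ∈ PySem.List.pyRange 1 M 1,
    (pvInB N (i + d) (j + d) → pvCellOK arr (i + d) (j + d)) ∧
    (pvInB N (i - d) (j - d) → pvCellOK arr (i - d) (j - d)) ∧
    (pvInB N (i + d) (j - d) → pvCellOK arr (i + d) (j - d)) ∧
    (pvInB N (i - d) (j + d) → pvCellOK arr (i - d) (j + d))

instance (N : Int) (M : Int) (arr : List (List Int)) (i : Int) (j : Int) : Decidable (Pre_remove2 N M arr i j) := by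
  unfold Pre_remove2 pvCellOK pvInB; infer_instance

def pvWitness_remove2 : Int × Int × List (List Int) × Int × Int := (2, 2, [[1, 2], [3, 4]], 0, 0)

def Spec_remove2 (N : Int) (M : Int) (arr : List (List Int)) (i : Int) (j : Int) (out : Int) : Prop := out = remove2_alt N M arr i j
instance (N : Int) (M : Int) (arr : List (List Int)) (i : Int) (j : Int) (out : Int) : Decidable (Spec_remove2 N M arr i j out) := by unfold Spec_remove2; infer_instance

-- ===== CLAIM (what is proved, stated in full; the proofs are below) =====
def Claim_equal_remove2 : Prop := ∀ (N : Int) (M : Int) (arr : List (List Int)) (i : Int) (j : Int), Dom_remove2 N M arr i j → Pre_remove2 N M arr i j → Spec_remove2 N M arr i j (remove2 N M arr i j)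

-- ===== LEMMAS AND PROOFS =====

-- the contribution of one cell guarded by the board-bounds check
def pvCellIf (N : Int) (arr : List (List Int)) (r c : Int) : Int :=
  if 0 ≤ r ∧ r < N ∧ 0 ≤ c ∧ c < N then pvCell arr r c else 0

-- per-row contribution common to both programs
def pvF (N M : Int) (arr : List (List Int)) (i j r : Int) : Int :=
  if 0 ≤ r ∧ r < N ∧ r ≠ i ∧ -M < r - i ∧ r - i < M then
    (if 0 ≤ j + (r - i) ∧ j + (r - i) < N then pvCell arr r (j + (r - i)) else 0) +
    (if 0 ≤ j - (r - i) ∧ j - (r - i) < N then pvCell arr r (j - (r - i)) else 0)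
  else 0

lemma foldl_ite_add (l : List Int) (init : Int) (C : Int → Prop) [DecidablePred C] (v : Int → Int) :
    l.foldl (fun s x => if C x then s + v x else s) init
      = init + (l.map (fun x => if C x then v x else 0)).sum := by
  rw [PySem.List.foldl_congr_mem l _ (fun s x => s + (if C x then v x else 0)) init
      (by intro acc x _; by_cases h : C x <;> simp [h])]
  exact PySem.List.foldl_add _ _ _

lemma sum_map_neg_range (f : Int → Int) : ∀ n : Nat,
    ((PySem.List.pyRange (-(n : Int)) 0 1).map f).sum
      = ((PySem.List.pyRange 1 ((n : Int) + 1) 1).map (fun a => f (-a))).sum := by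
  intro n
  induction n with
  | zero => simp [PySem.List.pyRange_one_eq_nil]
  | succ n ih =>
      rw [PySem.List.pyRange_one_cons (a := -((n+1 : Nat) : Int)) (by push_cast; omega)]
      push_cast
      rw [show (-((n : Int) + 1) + 1) = -(n : Int) by ring,
          PySem.List.pyRange_one_succ_right (a := 1) (b := (n : Int) + 1) (by omega)]
      simp only [List.map_cons, List.sum_cons, List.map_append, List.sum_append,
        List.map_nil, List.sum_nil]
      rw [ih]
      ring

-- Σ over range(0,N) of a point-indicator
lemma sum_ind_one_nat (g : Int → Int) (x : Int) : ∀ n : Nat,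
    ((PySem.List.pyRange 0 (n : Int) 1).map (fun c => if c = x then g c else 0)).sum
      = if 0 ≤ x ∧ x < (n : Int) then g x else 0 := by
  intro n
  induction n with
  | zero =>
      rw [PySem.List.pyRange_one_eq_nil (by omega)]
      simp only [List.map_nil, List.sum_nil]
      rw [if_neg (by omega)]
  | succ n ih =>
      rw [show ((n + 1 : Nat) : Int) = (n : Int) + 1 by push_cast; ring,
          PySem.List.pyRange_one_succ_right (a := 0) (b := (n : Int)) (by omega)]
      simp only [List.map_append, List.sum_append, List.map_cons, List.sum_cons,
        List.map_nil, List.sum_nil, add_zero]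
      rw [ih]
      by_cases hx : ((n : Int)) = x
      · rw [if_pos hx, if_neg (by omega), if_pos (by omega)]
        rw [hx]; ring
      · rw [if_neg hx, add_zero]
        by_cases hb : 0 ≤ x ∧ x < (n : Int)
        · rw [if_pos hb, if_pos (by omega)]
        · rw [if_neg hb, if_neg (by omega)]

lemma sum_ind_one (g : Int → Int) (x N : Int) :
    ((PySem.List.pyRange 0 N 1).map (fun c => if c = x then g c else 0)).sum
      = if 0 ≤ x ∧ x < N then g x else 0 := by
  by_cases hN : N ≤ 0
  · rw [PySem.List.pyRange_one_eq_nil hN]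
    simp; omega
  · rw [show N = (N.toNat : Int) by omega]
    exact sum_ind_one_nat g x N.toNat

-- extend a range sum by zero regions on both sides
lemma sum_extend (f : Int → Int) (a b a' b' : Int) (h1 : a' ≤ a) (h2 : a ≤ b) (h3 : b ≤ b')
    (hz : ∀ r : Int, (a' ≤ r ∧ r < a) ∨ (b ≤ r ∧ r < b') → f r = 0) :
    ((PySem.List.pyRange a' b' 1).map f).sum = ((PySem.List.pyRange a b 1).map f).sum := by
  rw [PySem.List.pyRange_one_append a' a b' h1 (by omega),
      PySem.List.pyRange_one_append a b b' h2 h3]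
  simp only [List.map_append, List.sum_append]
  rw [List.map_congr_left (fun r hr => hz r (Or.inl (PySem.List.mem_pyRange_one.mp hr))),
      List.map_congr_left (l := PySem.List.pyRange b b' 1)
        (fun r hr => hz r (Or.inr (PySem.List.mem_pyRange_one.mp hr)))]
  simp

-- shift the index of a range sum
lemma sum_shift (f : Int → Int) (t : Int) : ∀ (n : Nat) (a : Int),
    ((PySem.List.pyRange a (a + (n : Int)) 1).map f).sum
      = ((PySem.List.pyRange (a - t) (a - t + (n : Int)) 1).map (fun d => f (d + t))).sum := by
  intro n
  induction n with
  | zero => intro a; simp [PySem.List.pyRange_one_eq_nil]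
  | succ n ih =>
      intro a
      rw [show (a + ((n + 1 : Nat) : Int)) = (a + (n : Int)) + 1 by push_cast; ring,
          show (a - t + ((n + 1 : Nat) : Int)) = (a - t + (n : Int)) + 1 by push_cast; ring,
          PySem.List.pyRange_one_succ_right (a := a) (b := a + (n : Int)) (by omega),
          PySem.List.pyRange_one_succ_right (a := a - t) (b := a - t + (n : Int)) (by omega)]
      simp only [List.map_append, List.sum_append, List.map_cons, List.sum_cons,
        List.map_nil, List.sum_nil]
      rw [ih a, show a - t + (n : Int) + t = a + (n : Int) by ring]

lemma foldl_ray (l : List Int) (init : Int) (N : Int) (arr : List (List Int)) (i j dk ck : Int) :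
    l.foldl (fun s x =>
        if 0 ≤ i + dk * x ∧ i + dk * x < N ∧ 0 ≤ j + ck * x ∧ j + ck * x < N
        then s + pvCell arr (i + dk * x) (j + ck * x) else s) init
      = init + (l.map (fun x => pvCellIf N arr (i + dk * x) (j + ck * x))).sum := by
  rw [foldl_ite_add l init (fun x => 0 ≤ i + dk * x ∧ i + dk * x < N ∧ 0 ≤ j + ck * x ∧ j + ck * x < N)
      (fun x => pvCell arr (i + dk * x) (j + ck * x))]
  rfl

lemma pvF_pos (N M : Int) (arr : List (List Int)) (i j a : Int) (h1 : 1 ≤ a) (h2 : a < M) :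
    pvF N M arr i j (i + a)
      = pvCellIf N arr (i + a) (j + a) + pvCellIf N arr (i + a) (j - a) := by
  simp only [pvF, pvCellIf, add_sub_cancel_left]
  split_ifs <;> (try (exfalso; omega)) <;> ring

lemma pvF_neg (N M : Int) (arr : List (List Int)) (i j a : Int) (h1 : 1 ≤ a) (h2 : a < M) :
    pvF N M arr i j (i - a)
      = pvCellIf N arr (i - a) (j - a) + pvCellIf N arr (i - a) (j + a) := by
  simp only [pvF, pvCellIf, show i - a - i = -a by ring]
  split_ifs <;> (try (exfalso; omega)) <;> ring

lemma pvF_zero_far (N M : Int) (arr : List (List Int)) (i j r : Int)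
    (h : r = i ∨ r - i ≤ -M ∨ M ≤ r - i ∨ r < 0 ∨ N ≤ r) : pvF N M arr i j r = 0 := by
  simp only [pvF]
  rw [if_neg (by omega)]

-- B's inner loop over c computes pvF for rows inside the board
lemma inner_eq_pvF (N M : Int) (arr : List (List Int)) (i j r : Int) (hr : 0 ≤ r ∧ r < N) :
    ((PySem.List.pyRange 0 N 1).map (fun c =>
        if r - i ≠ 0 ∧ -M < r - i ∧ r - i < M ∧ (c = j + (r - i) ∨ c = j - (r - i))
        then pvCell arr r c else 0)).sum = pvF N M arr i j r := by
  by_cases hd : r - i ≠ 0 ∧ -M < r - i ∧ r - i < M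
  · have hxy : j + (r - i) ≠ j - (r - i) := by omega
    rw [List.map_congr_left (g := fun c =>
          (if c = j + (r - i) then pvCell arr r c else 0) +
          (if c = j - (r - i) then pvCell arr r c else 0))
        (by
          intro c _
          dsimp only
          by_cases h1 : c = j + (r - i)
          · rw [if_pos ⟨hd.1, hd.2.1, hd.2.2, Or.inl h1⟩, if_pos h1, if_neg (by omega), add_zero]
          · by_cases h2 : c = j - (r - i)
            · rw [if_pos ⟨hd.1, hd.2.1, hd.2.2, Or.inr h2⟩, if_neg h1, if_pos h2, zero_add]
            · rw [if_neg (by tauto), if_neg h1, if_neg h2, add_zero])]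
    rw [PySem.List.sum_map_add_int, sum_ind_one, sum_ind_one]
    simp only [pvF, if_pos (by omega : 0 ≤ r ∧ r < N ∧ r ≠ i ∧ -M < r - i ∧ r - i < M)]
  · rw [List.map_congr_left (g := fun _ => (0 : Int))
        (by intro c _; dsimp only; rw [if_neg]; tauto)]
    rw [pvF_zero_far N M arr i j r (by omega)]
    simp

lemma remove2_alt_eq_sum (N M : Int) (arr : List (List Int)) (i j : Int) :
    remove2_alt N M arr i j
      = pvCell arr i j + ((PySem.List.pyRange 0 N 1).map (pvF N M arr i j)).sum := by
  unfold remove2_alt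
  rw [PySem.List.foldl_congr_mem _ _ (fun total r => total + pvF N M arr i j r) _
      (by
        intro acc r hrm
        have hr := PySem.List.mem_pyRange_one.mp hrm
        dsimp only
        rw [foldl_ite_add _ acc
            (fun c => r - i ≠ 0 ∧ -M < r - i ∧ r - i < M ∧ (c = j + (r - i) ∨ c = j - (r - i)))
            (fun c => pvCell arr r c)]
        rw [inner_eq_pvF N M arr i j r (by omega)])]
  exact PySem.List.foldl_add _ _ _

-- reindexing: the symmetric offset sum over the two diagonals equals the row sum over the board
lemma offsets_eq_rows (N M : Int) (arr : List (List Int)) (i j : Int) :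
    ((PySem.List.pyRange 1 M 1).map
        (fun a => pvF N M arr i j (i + a) + pvF N M arr i j (i - a))).sum
      = ((PySem.List.pyRange 0 N 1).map (pvF N M arr i j)).sum := by
  by_cases hM : M ≤ 0
  · rw [PySem.List.pyRange_one_eq_nil (a := 1) (b := M) (by omega)]
    rw [List.map_congr_left (g := fun _ => (0 : Int))
        (fun r _ => pvF_zero_far N M arr i j r (by omega))]
    simp
  · by_cases hN : N ≤ 0
    · rw [PySem.List.pyRange_one_eq_nil (a := 0) (b := N) (by omega)]
      rw [List.map_congr_left (g := fun _ => (0 : Int))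
          (by
            intro a ham
            have ha := PySem.List.mem_pyRange_one.mp ham
            dsimp only
            rw [pvF_zero_far N M arr i j (i + a) (by omega),
                pvF_zero_far N M arr i j (i - a) (by omega), add_zero])]
      simp
    · -- main case: 1 ≤ M, 1 ≤ N
      have e1 : ((PySem.List.pyRange 0 N 1).map (pvF N M arr i j)).sum
          = ((PySem.List.pyRange (min 0 (i - (M - 1))) (max N (i + M)) 1).map (pvF N M arr i j)).sum := by
        rw [sum_extend (pvF N M arr i j) 0 N (min 0 (i - (M - 1))) (max N (i + M))
            (by omega) (by omega) (by omega)
            (fun r hr => pvF_zero_far N M arr i j r (by omega))]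
      have e2 : ((PySem.List.pyRange (min 0 (i - (M - 1))) (max N (i + M)) 1).map (pvF N M arr i j)).sum
          = ((PySem.List.pyRange (i - (M - 1)) (i + M) 1).map (pvF N M arr i j)).sum := by
        rw [sum_extend (pvF N M arr i j) (i - (M - 1)) (i + M) (min 0 (i - (M - 1))) (max N (i + M))
            (by omega) (by omega) (by omega)
            (fun r hr => pvF_zero_far N M arr i j r (by omega))]
      have e3 : ((PySem.List.pyRange (i - (M - 1)) (i + M) 1).map (pvF N M arr i j)).sum
          = ((PySem.List.pyRange (-(M - 1)) M 1).map (fun d => pvF N M arr i j (d + i))).sum := by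
        have h := sum_shift (pvF N M arr i j) i (2 * M - 1).toNat (i - (M - 1))
        rw [show (i - (M - 1) + ((2 * M - 1).toNat : Int)) = i + M by omega] at h
        rw [show (i - (M - 1) - i) = -(M - 1) by ring] at h
        rw [show (-(M - 1) + ((2 * M - 1).toNat : Int)) = M by omega] at h
        exact h
      rw [e1, e2, e3]
      rw [PySem.List.pyRange_one_append (-(M - 1)) 0 M (by omega) (by omega),
          PySem.List.pyRange_one_cons (by omega : (0:Int) < M)]
      simp only [List.map_append, List.sum_append, List.map_cons, List.sum_cons, zero_add]
      rw [pvF_zero_far N M arr i j i (by omega)]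
      rw [show -(M - 1) = -(((M - 1).toNat : Int)) by omega]
      rw [sum_map_neg_range (fun d => pvF N M arr i j (d + i)) (M - 1).toNat]
      rw [show ((M - 1).toNat : Int) + 1 = M by omega]
      rw [List.map_congr_left (l := PySem.List.pyRange 1 M 1)
            (f := fun a => pvF N M arr i j (-a + i)) (g := fun a => pvF N M arr i j (i - a))
            (by intro a _; dsimp only; rw [show -a + i = i - a by ring])]
      rw [List.map_congr_left (l := PySem.List.pyRange 1 M 1)
            (f := fun d => pvF N M arr i j (d + i)) (g := fun a => pvF N M arr i j (i + a))
            (by intro a _; dsimp only; rw [show a + i = i + a by ring])]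
      rw [PySem.List.sum_map_add_int]
      ring

theorem remove2_eq_alt (N M : Int) (arr : List (List Int)) (i j : Int) :
    remove2 N M arr i j = remove2_alt N M arr i j := by
  have h4 : PySem.List.pyRange 0 4 1 = [0, 1, 2, 3] := by decide
  have d0 : PySem.List.pyGetD ([-1, 1, 1, -1] : List Int) (0 : Int) 0 = -1 := by decide
  have d1 : PySem.List.pyGetD ([-1, 1, 1, -1] : List Int) (1 : Int) 0 = 1 := by decide
  have d2 : PySem.List.pyGetD ([-1, 1, 1, -1] : List Int) (2 : Int) 0 = 1 := by decide
  have d3 : PySem.List.pyGetD ([-1, 1, 1, -1] : List Int) (3 : Int) 0 = -1 := by decide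
  have c0 : PySem.List.pyGetD ([1, 1, -1, -1] : List Int) (0 : Int) 0 = 1 := by decide
  have c1 : PySem.List.pyGetD ([1, 1, -1, -1] : List Int) (1 : Int) 0 = 1 := by decide
  have c2 : PySem.List.pyGetD ([1, 1, -1, -1] : List Int) (2 : Int) 0 = -1 := by decide
  have c3 : PySem.List.pyGetD ([1, 1, -1, -1] : List Int) (3 : Int) 0 = -1 := by decide
  rw [remove2_alt_eq_sum, ← offsets_eq_rows]
  simp only [remove2, h4, List.foldl_cons, List.foldl_nil, d0, d1, d2, d3, c0, c1, c2, c3]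
  rw [foldl_ray, foldl_ray, foldl_ray, foldl_ray]
  simp only [neg_mul, one_mul, ← sub_eq_add_neg]
  rw [List.map_congr_left (l := PySem.List.pyRange 1 M 1)
        (f := fun a => pvF N M arr i j (i + a) + pvF N M arr i j (i - a))
        (g := fun a => (pvCellIf N arr (i + a) (j + a) + pvCellIf N arr (i + a) (j - a)) +
                        (pvCellIf N arr (i - a) (j - a) + pvCellIf N arr (i - a) (j + a)))
        (by
          intro a ham
          have ha := PySem.List.mem_pyRange_one.mp ham
          dsimp only
          rw [pvF_pos N M arr i j a (by omega) (by omega),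
              pvF_neg N M arr i j a (by omega) (by omega)])]
  repeat rw [PySem.List.sum_map_add_int]
  ring

-- ===== VERDICT (by name: the statement is the Claim_ definition above) =====
theorem remove2_spec : Claim_equal_remove2 := by
  intro N M arr i j _ _
  unfold Spec_remove2
  exact remove2_eq_alt N M arr i j
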